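-- pv_equiv track=rewrite | github.com/barstowlab/bee-3600-spring-2026-hw4 | CBB-butanol/utils/vectorOutput4.py | generateOutputMatrix
-- ===== SOURCE A (Python) =====
-- def generateOutputMatrix(vectorList, delimeter='\t'):
--
-- 	outputMatrix = []
-- 	outputString = ''
-- 	i = 0
--
--
--
-- 	while i < len(vectorList[0]):
--
-- 		outputString = ''
-- 		j = 0
--
-- 		while j < len(vectorList):
-- 			outputString += str(vectorList[j][i])
-- 			if j < len(vectorList) - 1:
-- 				outputString += delimeter
-- 			j += 1
--
-- 		outputString += '\n'
-- 		outputMatrix.append(outputString)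
-- 		i += 1
--
-- 	return outputMatrix
-- ===== SOURCE B (Python) =====
-- def generateOutputMatrix(vectorList, delimeter='\t'):
--     # Column-major: accumulate one buffer per output row, join each once.
--     n = len(vectorList[0])
--     rows = [[] for _ in range(n)]
--     for vector in vectorList:
--         for i in range(n):
--             rows[i].append(str(vector[i]))
--     return [delimeter.join(row) + '\n' for row in rows]
-- ===== Notes on version B (the rewrite author's own statement) =====
-- stated objective: faster
-- what changed: Replaces A's row-major nested while-loops with repeated string concatenation by a column-major pass that appends into one list buffer per output row and joins each buffer once at the end; Pre_ excludes only inputs where A raises IndexError (empty vectorList or a vector shorter than the first).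
import Mathlib
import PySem

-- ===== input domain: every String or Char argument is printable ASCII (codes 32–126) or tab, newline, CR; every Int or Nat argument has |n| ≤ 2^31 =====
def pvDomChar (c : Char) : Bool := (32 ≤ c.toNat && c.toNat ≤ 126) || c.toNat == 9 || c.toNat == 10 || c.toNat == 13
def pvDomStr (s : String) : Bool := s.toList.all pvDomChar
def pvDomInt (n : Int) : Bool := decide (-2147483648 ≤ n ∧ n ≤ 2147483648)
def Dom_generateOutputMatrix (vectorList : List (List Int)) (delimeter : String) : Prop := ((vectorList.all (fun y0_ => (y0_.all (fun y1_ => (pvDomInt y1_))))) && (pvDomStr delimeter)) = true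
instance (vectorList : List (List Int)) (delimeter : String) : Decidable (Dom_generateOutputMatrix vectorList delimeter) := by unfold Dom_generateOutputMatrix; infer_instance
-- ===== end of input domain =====

-- B replaces A's row-major nested while-loops (repeated string concatenation)
-- by a column-major pass appending into per-row buffers joined once at the end.

-- ===== PORT A =====
-- inner while over j: traverses vectorList in order; 'j < len(vectorList)-1'
-- holds exactly when the remaining tail after the current element is nonempty
def pvRowA (delimeter : String) (i : Int) : List (List Int) → String → String
  | [], outputString => outputString
  | v :: rest, outputString =>
      let s := outputString ++ PySem.Int.toStr (PySem.List.pyGetD v i 0)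
      let s := if rest.isEmpty then s else s ++ delimeter
      pvRowA delimeter i rest s

def generateOutputMatrix (vectorList : List (List Int)) (delimeter : String) : List String :=
  (List.range (PySem.List.pyGetD vectorList 0 []).length).foldl
    (fun outputMatrix (i : Nat) => outputMatrix ++ [pvRowA delimeter (i : Int) vectorList "" ++ "\n"]) []

-- ===== PORT B =====
-- rows[i].append(x) is modelled as updating index i of rows to rows[i] ++ [x]
def generateOutputMatrix_alt (vectorList : List (List Int)) (delimeter : String) : List String :=
  let n := (PySem.List.pyGetD vectorList 0 []).length
  let rows := vectorList.foldl
    (fun rows v => (List.range n).foldl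
      (fun rows (i : Nat) =>
        rows.set i (PySem.List.pyGetD rows (i : Int) [] ++ [PySem.Int.toStr (PySem.List.pyGetD v (i : Int) 0)]))
      rows)
    (List.replicate n ([] : List String))
  rows.map (fun row => PySem.Str.join delimeter row ++ "\n")

-- ===== PRECONDITION & SPEC =====
-- Pre_ excludes exactly the inputs where Python A raises IndexError:
-- an empty vectorList (vectorList[0]) or a vector shorter than vectorList[0].
def Pre_generateOutputMatrix (vectorList : List (List Int)) (delimeter : String) : Prop :=
  vectorList ≠ [] ∧ ∀ v ∈ vectorList, (vectorList.headD []).length ≤ v.length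
instance (vectorList : List (List Int)) (delimeter : String) : Decidable (Pre_generateOutputMatrix vectorList delimeter) := by unfold Pre_generateOutputMatrix; infer_instance

def pvWitness_generateOutputMatrix : List (List Int) × String := ([[1, 2], [3, 4], [5, 6]], ",")

def Spec_generateOutputMatrix (vectorList : List (List Int)) (delimeter : String) (out : List String) : Prop := out = generateOutputMatrix_alt vectorList delimeter
instance (vectorList : List (List Int)) (delimeter : String) (out : List String) : Decidable (Spec_generateOutputMatrix vectorList delimeter out) := by unfold Spec_generateOutputMatrix; infer_instance

-- ===== CLAIM (what is proved, stated in full; the proofs are below) =====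
def Claim_equal_generateOutputMatrix : Prop := ∀ (vectorList : List (List Int)) (delimeter : String), Dom_generateOutputMatrix vectorList delimeter → Pre_generateOutputMatrix vectorList delimeter → Spec_generateOutputMatrix vectorList delimeter (generateOutputMatrix vectorList delimeter)

-- ===== LEMMAS AND PROOFS =====

theorem str_join_nil (d : String) : PySem.Str.join d [] = "" := by
  apply String.toList_inj.mp
  simp [PySem.Str.toList_join, PySem.Chars.join_nil]

theorem str_join_singleton (d p : String) : PySem.Str.join d [p] = p := by
  apply String.toList_inj.mp
  simp [PySem.Str.toList_join, PySem.Chars.join_singleton]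

theorem str_join_cons_cons (d p q : String) (r : List String) :
    PySem.Str.join d (p :: q :: r) = p ++ d ++ PySem.Str.join d (q :: r) := by
  apply String.toList_inj.mp
  simp [PySem.Str.toList_join, PySem.Chars.join_cons_cons]

theorem pvRowA_eq_join (delimeter : String) (i : Int) :
    ∀ (l : List (List Int)) (s : String),
      pvRowA delimeter i l s
        = s ++ PySem.Str.join delimeter (l.map (fun v => PySem.Int.toStr (PySem.List.pyGetD v i 0))) := by
  intro l
  induction l with
  | nil => intro s; simp [pvRowA, str_join_nil]
  | cons v rest ih =>
    intro s
    cases rest with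
    | nil => simp [pvRowA, str_join_singleton]
    | cons w t =>
      have hstep : pvRowA delimeter i (v :: w :: t) s
          = pvRowA delimeter i (w :: t)
              (s ++ PySem.Int.toStr (PySem.List.pyGetD v i 0) ++ delimeter) := by
        simp [pvRowA]
      rw [hstep, ih]
      simp only [List.map_cons]
      rw [str_join_cons_cons]
      simp [String.append_assoc]

-- the inner for-loop sets every index of the segment [s, s+cnt): pointwise view
theorem inner_fold_aux (f : Nat → String) :
    ∀ (cnt s : Nat) (rows : List (List String)), rows.length = s + cnt →
      (List.range' s cnt).foldl
          (fun rows (i : Nat) => rows.set i ((PySem.List.pyGetD rows (i : Int) ([] : List String)) ++ [f i])) rows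
        = rows.mapIdx (fun i r => if s ≤ i then r ++ [f i] else r) := by
  intro cnt
  induction cnt with
  | zero =>
    intro s rows hlen
    simp only [List.range', List.foldl_nil]
    apply List.ext_getElem (by simp)
    intro i hi hi2
    have hlt : i < s := by simp at hi; omega
    simp [List.getElem_mapIdx, Nat.not_le.mpr hlt]
  | succ c ih =>
    intro s rows hlen
    rw [List.range'_succ, List.foldl_cons]
    have hs : s < rows.length := by omega
    have hget : PySem.List.pyGetD rows (s : Int) [] = rows[s] := by
      rw [PySem.List.pyGetD_natCast]; simp [List.getD, hs]
    rw [hget, ih (s + 1) _ (by simp; omega)]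
    apply List.ext_getElem (by simp)
    intro i hi hi2
    have hilen : i < rows.length := by simp at hi; omega
    simp only [List.getElem_mapIdx, List.getElem_set]
    by_cases h : s = i
    · subst h; simp
    · have heq : (s + 1 ≤ i) ↔ (s ≤ i) := by omega
      simp [h, heq]

-- inner loop on a fully-indexed buffer (range n).map g
theorem inner_fold (n : Nat) (f : Nat → String) (g : Nat → List String) :
    (List.range n).foldl
        (fun rows (i : Nat) => rows.set i ((PySem.List.pyGetD rows (i : Int) ([] : List String)) ++ [f i]))
        ((List.range n).map g)
      = (List.range n).map (fun i => g i ++ [f i]) := by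
  rw [List.range_eq_range']
  rw [inner_fold_aux f n 0 _ (by simp)]
  apply List.ext_getElem (by simp)
  intro i hi hi2
  simp [List.getElem_mapIdx]

-- outer loop invariant over the vectors
theorem rows_invariant (n : Nat) (f : List Int → Nat → String) :
    ∀ (l : List (List Int)) (g : Nat → List String),
      l.foldl
          (fun rows v => (List.range n).foldl
            (fun rows (i : Nat) => rows.set i ((PySem.List.pyGetD rows (i : Int) ([] : List String)) ++ [f v i]))
            rows)
          ((List.range n).map g)
        = (List.range n).map (fun i => g i ++ l.map (fun v => f v i)) := by
  intro l
  induction l with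
  | nil => intro g; simp
  | cons v t ih =>
    intro g
    simp only [List.foldl_cons]
    rw [inner_fold n (f v) g, ih]
    apply List.map_congr_left
    intro i _
    simp

theorem generateOutputMatrix_eq (vectorList : List (List Int)) (delimeter : String) :
    generateOutputMatrix vectorList delimeter = generateOutputMatrix_alt vectorList delimeter := by
  simp only [generateOutputMatrix, generateOutputMatrix_alt]
  rw [PySem.List.foldl_append_singleton_eq_map]
  have hrep : (List.replicate (PySem.List.pyGetD vectorList 0 []).length ([] : List String))
      = (List.range (PySem.List.pyGetD vectorList 0 []).length).map (fun _ => ([] : List String)) := by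
    simp [List.map_const']
  rw [hrep, rows_invariant, List.map_map]
  apply List.map_congr_left
  intro i _
  simp [pvRowA_eq_join]

-- ===== VERDICT (by name: the statement is the Claim_ definition above) =====
theorem generateOutputMatrix_spec : Claim_equal_generateOutputMatrix := by
  intro vectorList delimeter _ _
  unfold Spec_generateOutputMatrix
  exact generateOutputMatrix_eq vectorList delimeter
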